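-- pv_equiv track=rewrite | github.com/ovidiocbba/python-code-katas | sevenkyu/kill_the_monsters.py | kill_monsters
-- ===== SOURCE A (Python) =====
-- def kill_monsters(health, monsters, damage):
--     hits = 0
--     max_hits = 0
--     for index in range(0, monsters):
--         if max_hits == 3:
--             max_hits = 0
--             hits += 1
--         max_hits += 1
--     damage_total = damage * hits
--     health -= damage_total
--     if health <= 0:
--         return "hero died"
--     return f"hits: {hits}, damage: {damage_total}, health: {health}"
-- ===== SOURCE B (Python) =====
-- def kill_monsters(health, monsters, damage):
--     hits = (monsters - 1) // 3 if monsters > 0 else 0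
--     damage_total = damage * hits
--     health -= damage_total
--     if health <= 0:
--         return "hero died"
--     return f"hits: {hits}, damage: {damage_total}, health: {health}"
-- ===== Notes on version B (the rewrite author's own statement) =====
-- stated objective: faster
-- what changed: Replaced the O(monsters) counting loop by the closed form hits = (monsters-1)//3 for monsters > 0 (else 0).
import Mathlib
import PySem

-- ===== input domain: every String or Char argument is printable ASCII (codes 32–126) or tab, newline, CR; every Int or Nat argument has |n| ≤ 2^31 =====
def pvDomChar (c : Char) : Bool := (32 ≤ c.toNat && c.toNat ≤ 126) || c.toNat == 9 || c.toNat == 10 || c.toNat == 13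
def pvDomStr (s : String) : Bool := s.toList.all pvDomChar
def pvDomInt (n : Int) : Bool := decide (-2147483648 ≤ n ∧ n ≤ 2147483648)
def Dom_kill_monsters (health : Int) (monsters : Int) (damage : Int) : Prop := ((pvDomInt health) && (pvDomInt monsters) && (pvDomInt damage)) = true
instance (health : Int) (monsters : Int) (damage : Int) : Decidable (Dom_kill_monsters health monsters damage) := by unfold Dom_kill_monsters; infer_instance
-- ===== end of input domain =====

-- B replaces A's O(monsters) counting loop by the closed form hits = (monsters-1)//3 (0 for monsters ≤ 0); measurably faster (asymptotic).


-- ===== PORT A =====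
-- loop body: if max_hits == 3: max_hits = 0; hits += 1; then max_hits += 1
def kmStep (s : Int × Int) (_index : Int) : Int × Int :=
  if s.2 == 3 then (s.1 + 1, 0 + 1) else (s.1, s.2 + 1)

def kill_monsters (health : Int) (monsters : Int) (damage : Int) : String :=
  let st := (PySem.List.pyRange 0 monsters 1).foldl kmStep ((0 : Int), (0 : Int))
  let hits := st.1
  let damage_total := damage * hits
  let health := health - damage_total
  if health ≤ 0 then "hero died"
  else "hits: " ++ PySem.Int.toStr hits ++ ", damage: " ++ PySem.Int.toStr damage_total
       ++ ", health: " ++ PySem.Int.toStr health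

-- ===== PORT B =====
def kill_monsters_alt (health : Int) (monsters : Int) (damage : Int) : String :=
  let hits := if monsters > 0 then PySem.Int.floordiv (monsters - 1) 3 else 0
  let damage_total := damage * hits
  let health := health - damage_total
  if health ≤ 0 then "hero died"
  else "hits: " ++ PySem.Int.toStr hits ++ ", damage: " ++ PySem.Int.toStr damage_total
       ++ ", health: " ++ PySem.Int.toStr health

-- ===== PRECONDITION & SPEC =====
def Spec_kill_monsters (health : Int) (monsters : Int) (damage : Int) (out : String) : Prop := out = kill_monsters_alt health monsters damage
instance (health : Int) (monsters : Int) (damage : Int) (out : String) : Decidable (Spec_kill_monsters health monsters damage out) := by unfold Spec_kill_monsters; infer_instance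

-- ===== CLAIM (what is proved, stated in full; the proofs are below) =====
def Claim_equal_kill_monsters : Prop := ∀ (health : Int) (monsters : Int) (damage : Int), Dom_kill_monsters health monsters damage → Spec_kill_monsters health monsters damage (kill_monsters health monsters damage)

-- ===== LEMMAS AND PROOFS =====

-- step ignores the element, so the fold is plain iteration of kmStep
def kmIter : Nat → Int × Int → Int × Int
  | 0, s => s
  | n + 1, s => kmIter n (kmStep s 0)

theorem foldl_kmStep_eq_iter (l : List Int) (s : Int × Int) :
    l.foldl kmStep s = kmIter l.length s := by
  induction l generalizing s with
  | nil => rfl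
  | cons x xs ih =>
      simp only [List.foldl, List.length_cons, kmIter]
      exact ih _

theorem kmIter_succ' (n : Nat) (s : Int × Int) :
    kmIter (n + 1) s = kmStep (kmIter n s) 0 := by
  induction n generalizing s with
  | zero => rfl
  | succ n ih => rw [kmIter, ih, kmIter]

theorem kmIter_closed (n : Nat) :
    kmIter (n + 1) ((0 : Int), (0 : Int)) = (((n / 3 : Nat) : Int), ((n % 3 : Nat) : Int) + 1) := by
  induction n with
  | zero => decide
  | succ n ih =>
      rw [kmIter_succ', ih, kmStep]
      by_cases h : (n % 3 : Nat) = 2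
      · rw [if_pos (by simp [h]), Prod.mk.injEq]
        constructor <;> omega
      · rw [if_neg (by simp; omega), Prod.mk.injEq]
        constructor <;> omega

theorem hits_eq (monsters : Int) :
    ((PySem.List.pyRange 0 monsters 1).foldl kmStep ((0 : Int), (0 : Int))).1
      = (if monsters > 0 then PySem.Int.floordiv (monsters - 1) 3 else 0) := by
  rw [foldl_kmStep_eq_iter, PySem.List.length_pyRange_one]
  by_cases hm : monsters > 0
  · have hn : (monsters - 0).toNat = ((monsters - 0).toNat - 1) + 1 := by omega
    rw [hn, kmIter_closed, if_pos hm,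
        PySem.Int.floordiv_eq_ediv_of_pos (by norm_num)]
    simp only
    omega
  · have : (monsters - 0).toNat = 0 := by omega
    rw [this, if_neg hm]
    rfl

-- ===== VERDICT (by name: the statement is the Claim_ definition above) =====
theorem kill_monsters_spec : Claim_equal_kill_monsters := by
  intro health monsters damage _
  unfold Spec_kill_monsters kill_monsters kill_monsters_alt
  simp only [hits_eq]
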